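-- pv_equiv track=rewrite | github.com/tomiock/gGAN | quantumGAN/functions.py | create_entangler_map
-- ===== SOURCE A (Python) =====
-- import itertools
--
-- def create_entangler_map(num_qubits: int):
-- 	lst = [list(i) for i in itertools.combinations(range(num_qubits), 2)]
-- 	index = 0
-- 	entangler_map = []
-- 	for i in reversed(range(num_qubits)):
-- 		try:
-- 			entangler_map.append(lst[index])
-- 			index += i
--
-- 		except IndexError:
-- 			return entangler_map
-- ===== SOURCE B (Python) =====
-- def create_entangler_map(num_qubits: int):
--     # Closed form: the index jumps in A land exactly on the adjacent pairs
--     # (j, j+1); no need to materialize all C(n,2) combinations.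
--     if num_qubits <= 0:
--         return None
--     return [[j, j + 1] for j in range(num_qubits - 1)]
-- ===== Notes on version B (the rewrite author's own statement) =====
-- stated objective: faster
-- what changed: B emits the adjacent pairs [j, j+1] directly by a closed form instead of materializing all C(n,2) combinations and hopping through that list with a growing stride until IndexError.
import Mathlib
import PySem

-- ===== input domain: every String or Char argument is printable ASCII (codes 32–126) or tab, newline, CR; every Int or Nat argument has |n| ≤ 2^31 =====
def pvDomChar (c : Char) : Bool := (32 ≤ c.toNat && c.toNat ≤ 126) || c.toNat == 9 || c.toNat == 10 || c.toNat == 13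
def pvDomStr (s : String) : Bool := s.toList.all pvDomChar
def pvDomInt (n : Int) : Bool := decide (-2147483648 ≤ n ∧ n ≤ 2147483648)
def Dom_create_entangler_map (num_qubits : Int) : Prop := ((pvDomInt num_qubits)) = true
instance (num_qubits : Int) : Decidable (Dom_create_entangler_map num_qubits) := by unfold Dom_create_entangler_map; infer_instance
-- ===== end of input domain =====

-- B replaces A's "build all C(n,2) combinations, then hop with a growing stride
-- until IndexError" by directly emitting the adjacent pairs [j, j+1] (asymptotically faster).

-- ===== PORT A =====
-- lst = [list(i) for i in itertools.combinations(range(a, b), 2)] (port uses a = 0;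
-- the start parameter generalizes the same construction for the proofs)
def pvComb (a b : Int) : List (List Int) :=
  (PySem.List.pyRange a b 1).flatMap
    (fun i => (PySem.List.pyRange (i + 1) b 1).map (fun j => [i, j]))

-- the 'for i in reversed(range(num_qubits))' loop with try/except IndexError:
-- falling off the loop end returns None (Python's implicit return)
def pvA_loop (lst : List (List Int)) : List Int → Int → List (List Int) → Option (List (List Int))
  | [], _, _ => none
  | i :: rest, index, acc =>
    match PySem.List.pyGet? lst index with
    | none => some acc
    | some x => pvA_loop lst rest (index + i) (acc ++ [x])

def create_entangler_map (num_qubits : Int) : Option (List (List Int)) :=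
  pvA_loop (pvComb 0 num_qubits) ((PySem.List.pyRange 0 num_qubits 1).reverse) 0 []

-- ===== PORT B =====
def create_entangler_map_alt (num_qubits : Int) : Option (List (List Int)) :=
  if num_qubits ≤ 0 then none
  else some ((PySem.List.pyRange 0 (num_qubits - 1) 1).map (fun j => [j, j + 1]))

-- ===== PRECONDITION & SPEC =====
def Spec_create_entangler_map (num_qubits : Int) (out : Option (List (List Int))) : Prop := out = create_entangler_map_alt num_qubits
instance (num_qubits : Int) (out : Option (List (List Int))) : Decidable (Spec_create_entangler_map num_qubits out) := by unfold Spec_create_entangler_map; infer_instance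

-- ===== CLAIM (what is proved, stated in full; the proofs are below) =====
def Claim_equal_create_entangler_map : Prop := ∀ (num_qubits : Int), Dom_create_entangler_map num_qubits → Spec_create_entangler_map num_qubits (create_entangler_map num_qubits)

-- ===== LEMMAS AND PROOFS =====

-- prepending a block of length p and shifting the start index by p does not change the loop,
-- as long as the index stays nonnegative (all strides in the iteration list are ≥ 0)
theorem pvA_loop_shift (iter : List Int) (hiter : ∀ i ∈ iter, 0 ≤ i) :
    ∀ (pre lst : List (List Int)) (idx : Int) (acc : List (List Int)), 0 ≤ idx →
    pvA_loop (pre ++ lst) iter ((pre.length : Int) + idx) acc = pvA_loop lst iter idx acc := by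
  induction iter with
  | nil => intro pre lst idx acc _; rfl
  | cons i rest ih =>
    intro pre lst idx acc hidx
    have hi : 0 ≤ i := hiter i (by simp)
    have h1 : PySem.List.pyGet? (pre ++ lst) ((pre.length : Int) + idx)
        = lst[idx.toNat]? := by
      have := PySem.List.pyGet?_append_right (pre := pre) (ys := lst) (k := idx.toNat)
      simpa [Int.toNat_of_nonneg hidx] using this
    have h2 : PySem.List.pyGet? lst idx = lst[idx.toNat]? :=
      PySem.List.pyGet?_of_nonneg lst hidx
    simp only [pvA_loop, h1, h2]
    cases hget : lst[idx.toNat]? with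
    | none => rfl
    | some x =>
      have := ih (fun j hj => hiter j (by simp [hj])) pre lst (idx + i) (acc ++ [x])
        (by omega)
      simpa [add_assoc] using this

-- splitting off the first block of combinations
theorem pvComb_cons (a b : Int) (h : a < b) :
    pvComb a b = ((PySem.List.pyRange (a + 1) b 1).map (fun j => [a, j])) ++ pvComb (a + 1) b := by
  unfold pvComb
  rw [PySem.List.pyRange_one_cons h, List.flatMap_cons]

theorem pvComb_nil (a b : Int) (h : b ≤ a + 1) : pvComb a b = [] := by
  rcases lt_or_ge a b with hab | hab
  · rw [pvComb_cons a b hab]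
    have h1 : PySem.List.pyRange (a + 1) b 1 = [] := PySem.List.pyRange_one_eq_nil h
    have h2 : pvComb (a + 1) b = [] := by
      unfold pvComb; rw [h1]; rfl
    simp [h1, h2]
  · unfold pvComb
    rw [PySem.List.pyRange_one_eq_nil hab]; rfl

theorem pvRev_nonneg (m : Nat) : ∀ i ∈ (PySem.List.pyRange 0 (m : Int) 1).reverse, 0 ≤ i := by
  intro i hi
  rw [List.mem_reverse, PySem.List.mem_pyRange_one] at hi
  exact hi.1

-- main invariant: the loop over combinations starting at a, with m values left, collects
-- exactly the adjacent pairs [a,a+1], …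
theorem pvA_loop_comb : ∀ (m : Nat), 1 ≤ m → ∀ (a : Int) (acc : List (List Int)),
    pvA_loop (pvComb a (a + m)) ((PySem.List.pyRange 0 (m : Int) 1).reverse) 0 acc
      = some (acc ++ (PySem.List.pyRange a (a + m - 1) 1).map (fun j => [j, j + 1])) := by
  intro m
  induction m with
  | zero => omega
  | succ m ih =>
    intro _ a acc
    rcases Nat.eq_zero_or_pos m with hm0 | hm1
    · subst hm0
      have hc : pvComb a (a + (1:Nat)) = [] := pvComb_nil _ _ (by push_cast; omega)
      have hr : PySem.List.pyRange 0 ((1:Nat) : Int) 1 = [0] := by decide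
      have hr2 : PySem.List.pyRange a (a + (1:Nat) - 1) 1 = [] :=
        PySem.List.pyRange_one_eq_nil (by push_cast; omega)
      rw [hc, hr, hr2]
      simp [pvA_loop, PySem.List.pyGet?]
    · -- m ≥ 1
      have hcast : ((m + 1 : Nat) : Int) = (m : Int) + 1 := by push_cast; ring
      have hiter : (PySem.List.pyRange 0 ((m + 1 : Nat) : Int) 1).reverse
          = (m : Int) :: (PySem.List.pyRange 0 (m : Int) 1).reverse := by
        rw [hcast, PySem.List.pyRange_one_succ_right (by positivity)]
        simp
      have hcomb : pvComb a (a + ((m+1 : Nat) : Int))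
          = ((PySem.List.pyRange (a + 1) (a + ((m+1:Nat) : Int)) 1).map (fun j => [a, j]))
            ++ pvComb (a + 1) (a + ((m+1:Nat) : Int)) := by
        exact pvComb_cons _ _ (by push_cast; omega)
      have hblock : PySem.List.pyRange (a + 1) (a + ((m+1:Nat) : Int)) 1
          = (a + 1) :: PySem.List.pyRange (a + 2) (a + ((m+1:Nat) : Int)) 1 := by
        rw [PySem.List.pyRange_one_cons (by push_cast; omega)]
        ring_nf
      set block := (PySem.List.pyRange (a + 1) (a + ((m+1:Nat) : Int)) 1).map
          (fun j => [a, j]) with hblockdef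
      have hlen : (block.length : Int) = (m : Int) := by
        rw [hblockdef, List.length_map, PySem.List.length_pyRange_one]
        push_cast; omega
      have hget0 : PySem.List.pyGet? (block ++ pvComb (a + 1) (a + ((m+1:Nat) : Int))) 0
          = some [a, a + 1] := by
        rw [hblockdef, hblock]
        simp [PySem.List.pyGet?_zero_cons]
      rw [hiter, hcomb]
      simp only [pvA_loop, hget0]
      have hshift := pvA_loop_shift ((PySem.List.pyRange 0 (m : Int) 1).reverse)
        (pvRev_nonneg m) block (pvComb (a + 1) (a + ((m+1:Nat) : Int))) 0
        (acc ++ [[a, a + 1]]) le_rfl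
      rw [hlen] at hshift
      rw [show (0 : Int) + (m : Int) = (m : Int) + 0 by ring, hshift]
      have harg : a + ((m+1:Nat) : Int) = (a + 1) + (m : Int) := by push_cast; ring
      rw [harg]
      rw [ih hm1 (a + 1) (acc ++ [[a, a + 1]])]
      have hsplit : PySem.List.pyRange a ((a + 1) + (m : Int) - 1) 1
          = a :: PySem.List.pyRange (a + 1) ((a + 1) + (m : Int) - 1) 1 := by
        rw [PySem.List.pyRange_one_cons (by omega)]
      rw [hsplit]
      simp

-- ===== VERDICT (by name: the statement is the Claim_ definition above) =====
theorem create_entangler_map_spec : Claim_equal_create_entangler_map := by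
  intro n _
  unfold Spec_create_entangler_map create_entangler_map create_entangler_map_alt
  by_cases hn : n ≤ 0
  · rw [if_pos hn]
    rw [show (PySem.List.pyRange 0 n 1).reverse = [] by
      rw [PySem.List.pyRange_one_eq_nil hn]; rfl]
    rfl
  · rw [if_neg hn]
    have hm : n = ((n.toNat : Nat) : Int) := by omega
    have h1 : 1 ≤ n.toNat := by omega
    have := pvA_loop_comb n.toNat h1 0 []
    rw [hm]
    simpa using this
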